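-- pv_equiv track=rewrite | github.com/mark-smits/CSD2 | csd2a/euclidean/src/seq_gen.py | min_verm
-- ===== SOURCE A (Python) =====
-- def min_verm(list): # ga op zoek naar de laagste waarde waardoor de lengtes voor alle sequences gedeeld kan worden door te controleren of de modulo voor alle sequences 0 is gegeven een product
--     incompleet = True
--     product = 1
--     while incompleet:
--         check = 0
--         for i in list:
--             check = check + (product % sum(i))
--         if check == 0:
--             incompleet = False
--             return product
--         else:
--             product = product + 1
-- ===== SOURCE B (Python) =====
-- def min_verm(list):
--     # fold the least common multiple of the sequence sums with Euclid's gcd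
--     result = 1
--     for seq in list:
--         s = abs(sum(seq))
--         a, b = result, s
--         while b:
--             a, b = b, a % b
--         result = result * s // a
--     return result
-- ===== Notes on version B (the rewrite author's own statement) =====
-- stated objective: alternative
-- what changed: B computes each inner sum once and folds the least common multiple with Euclid's gcd instead of linearly searching candidate products; Pre_ excludes zero sums, on which A raises ZeroDivisionError, and mixed-sign sums, on which A's summed-remainder zero test can stop at a value not divisible by every sum (the sums stand for sequence lengths, so uniform sign is the natural domain).
-- outside the precondition, e.g. on min_verm([[1], [2], [-3]]): A returns 5, B returns 6; on min_verm([[3], [-3]]): A returns 3, B returns 3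
import Mathlib
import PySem

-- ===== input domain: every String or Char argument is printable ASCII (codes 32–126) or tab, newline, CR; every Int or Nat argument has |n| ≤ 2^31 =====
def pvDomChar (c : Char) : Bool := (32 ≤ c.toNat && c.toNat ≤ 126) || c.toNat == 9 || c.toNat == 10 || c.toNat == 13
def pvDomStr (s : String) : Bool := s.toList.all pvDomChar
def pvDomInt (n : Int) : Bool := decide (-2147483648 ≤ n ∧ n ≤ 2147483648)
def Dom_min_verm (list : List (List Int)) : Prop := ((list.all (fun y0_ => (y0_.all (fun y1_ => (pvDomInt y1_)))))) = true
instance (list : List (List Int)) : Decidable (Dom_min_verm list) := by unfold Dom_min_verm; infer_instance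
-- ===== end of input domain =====

-- B computes each inner sum once and folds the lcm with Euclid's gcd instead of
-- linearly searching candidate products.

-- ===== PORT A =====
-- check = check + (product % sum(i)) over the list
def aCheck (list : List (List Int)) (product : Int) : Int :=
  list.foldl (fun check i => check + PySem.Int.mod product i.sum) 0

-- fuel for the Python 'while' loop; proved sufficient on Pre_ (the answer divides
-- this product of the |sums|)
def aFuel (list : List (List Int)) : Nat :=
  list.foldl (fun acc i => acc * max 1 i.sum.natAbs) 1

def aLoop (list : List (List Int)) : Nat → Int → Int
  | 0, product => product
  | fuel+1, product =>
      if aCheck list product = 0 then product else aLoop list fuel (product + 1)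

def min_verm (list : List (List Int)) : Int :=
  aLoop list (aFuel list) 1

-- ===== PORT B =====
-- while b: a, b = b, a % b
def bGcd (a b : Int) : Int :=
  if h : b = 0 then a else bGcd b (PySem.Int.mod a b)
termination_by b.natAbs
decreasing_by
  rcases lt_trichotomy b 0 with hb | hb | hb
  · have h12 := PySem.Int.mod_neg_bounds a hb
    omega
  · exact absurd hb h
  · have h1 := PySem.Int.mod_nonneg a hb
    have h2 := PySem.Int.mod_lt a hb
    omega

-- result = result * s // gcd(result, s), s = abs(sum(seq)), over the list
def min_verm_alt (list : List (List Int)) : Int :=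
  list.foldl
    (fun result seq =>
      let s := |seq.sum|
      PySem.Int.floordiv (result * s) (bGcd result s)) 1

-- ===== PRECONDITION & SPEC =====
-- Pre_ excludes zero sums, on which A raises ZeroDivisionError, and mixed-sign sums,
-- on which A's summed-remainder zero test can stop at a value not divisible by every
-- sum (the sums stand for sequence lengths, so uniform sign is the natural domain).
def Pre_min_verm (list : List (List Int)) : Prop :=
  (∀ i ∈ list, 0 < i.sum) ∨ (∀ i ∈ list, i.sum < 0)
instance (list : List (List Int)) : Decidable (Pre_min_verm list) := by
  unfold Pre_min_verm; infer_instance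

def pvWitness_min_verm : List (List Int) := [[2], [3, 1]]

def Spec_min_verm (list : List (List Int)) (out : Int) : Prop := out = min_verm_alt list
instance (list : List (List Int)) (out : Int) : Decidable (Spec_min_verm list out) := by
  unfold Spec_min_verm; infer_instance

-- ===== CLAIM (what is proved, stated in full; the proofs are below) =====
def Claim_equal_min_verm : Prop :=
  ∀ (list : List (List Int)), Dom_min_verm list → Pre_min_verm list →
    Spec_min_verm list (min_verm list)

-- ===== LEMMAS AND PROOFS =====

-- Python % (sign of the divisor), abbreviated
def fm (p s : Int) : Int := PySem.Int.mod p s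

theorem foldl_add_init {α : Type} (l : List α) (g : α → Int) (c0 : Int) :
    l.foldl (fun c i => c + g i) c0 = c0 + (l.map g).sum := by
  induction l generalizing c0 with
  | nil => simp
  | cons x xs ih => simp [ih]; ring

-- A's check is the sum of the Python remainders of the sums
theorem aCheck_eq (list : List (List Int)) (p : Int) :
    aCheck list p = ((list.map (fun i => i.sum)).map (fun s => fm p s)).sum := by
  unfold aCheck
  rw [foldl_add_init list (fun i => PySem.Int.mod p i.sum) 0, List.map_map]
  simp only [zero_add, Function.comp_def, fm]

def ok (sums : List Int) (p : Int) : Prop := (sums.map (fun s => fm p s)).sum = 0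

theorem list_sum_nonpos (l : List Int) (h : ∀ x ∈ l, x ≤ 0) : l.sum ≤ 0 := by
  induction l with
  | nil => simp
  | cons a t ih =>
      have ha : a ≤ 0 := h a (by simp)
      have ht := ih (fun y hy => h y (by simp [hy]))
      simp only [List.sum_cons]
      omega

-- a list of uniformly-signed integers summing to zero is all zero
theorem sum_zero_all_zero (l : List Int) (h : (∀ x ∈ l, 0 ≤ x) ∨ (∀ x ∈ l, x ≤ 0))
    (hs : l.sum = 0) : ∀ x ∈ l, x = 0 := by
  induction l with
  | nil => simp
  | cons a t ih =>
      have htail : (∀ x ∈ t, 0 ≤ x) ∨ (∀ x ∈ t, x ≤ 0) := by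
        rcases h with h | h
        · exact Or.inl (fun y hy => h y (by simp [hy]))
        · exact Or.inr (fun y hy => h y (by simp [hy]))
      simp only [List.sum_cons] at hs
      have haz : a = 0 ∧ t.sum = 0 := by
        rcases h with h | h
        · have ha : 0 ≤ a := h a (by simp)
          have ht : 0 ≤ t.sum := List.sum_nonneg (fun x hx => h x (by simp [hx]))
          omega
        · have ha : a ≤ 0 := h a (by simp)
          have ht : t.sum ≤ 0 := list_sum_nonpos t (fun x hx => h x (by simp [hx]))
          omega
      intro x hx
      rcases List.mem_cons.mp hx with rfl | hx
      · exact haz.1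
      · exact ih htail haz.2 x hx

-- with uniformly-signed divisors, A's summed-remainder test means: every sum divides p
theorem ok_iff_dvd (sums : List Int)
    (hsign : (∀ s ∈ sums, 0 < s) ∨ (∀ s ∈ sums, s < 0)) (p : Int) :
    ok sums p ↔ ∀ s ∈ sums, s ∣ p := by
  unfold ok
  constructor
  · intro h s hs
    have hz : fm p s = 0 := by
      refine sum_zero_all_zero _ ?_ h (fm p s) (List.mem_map_of_mem hs)
      rcases hsign with hsign | hsign
      · refine Or.inl ?_
        intro x hx
        rcases List.mem_map.mp hx with ⟨t, ht, rfl⟩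
        exact PySem.Int.mod_nonneg p (hsign t ht)
      · refine Or.inr ?_
        intro x hx
        rcases List.mem_map.mp hx with ⟨t, ht, rfl⟩
        exact (PySem.Int.mod_neg_bounds p (hsign t ht)).2
    exact (PySem.Int.mod_eq_zero_iff_dvd p s).mp hz
  · intro h
    apply List.sum_eq_zero
    intro x hx
    rcases List.mem_map.mp hx with ⟨s, hs, rfl⟩
    exact (PySem.Int.mod_eq_zero_iff_dvd p s).mpr (h s hs)

theorem aLoop_finds (list : List (List Int)) :
    ∀ (fuel : Nat) (p T : Int), p ≤ T → T ≤ p + fuel →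
      ok (list.map (fun i => i.sum)) T →
      (∀ q, p ≤ q → q < T → ¬ ok (list.map (fun i => i.sum)) q) →
      aLoop list fuel p = T := by
  intro fuel
  induction fuel with
  | zero =>
      intro p T h1 h2 _ _
      have : p = T := by push_cast at h2; omega
      simp [aLoop, this]
  | succ m ih =>
      intro p T h1 h2 hok hleast
      unfold aLoop
      rw [aCheck_eq]
      by_cases hc : ((list.map (fun i => i.sum)).map (fun s => fm p s)).sum = 0
      · have hTp : T = p := by
          by_contra hne
          exact hleast p le_rfl (by omega) (by unfold ok; exact hc)
        rw [if_pos hc, hTp]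
      · have hpT : p < T := by
          rcases eq_or_lt_of_le h1 with h | h
          · exfalso; apply hc; have := hok; unfold ok at this; rw [h]; exact this
          · exact h
        rw [if_neg hc]
        exact ih (p + 1) T (by omega) (by omega) hok
          (fun q hq1 hq2 => hleast q (by omega) hq2)

-- the Nat-valued lcm fold that B computes
def natLcm (sums : List Int) : Nat :=
  sums.foldl (fun n s => Nat.lcm n s.natAbs) 1

theorem bGcd_eq_aux : ∀ (n : Nat) (a b : Int), b.natAbs ≤ n → 0 ≤ a → 0 ≤ b →
    bGcd a b = (Int.gcd a b : Int) := by
  intro n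
  induction n with
  | zero =>
      intro a b hn ha hb
      have hb0 : b = 0 := by omega
      subst hb0
      rw [bGcd]
      simp [Int.gcd, Int.natAbs_of_nonneg ha]
  | succ m ih =>
      intro a b hn ha hb
      by_cases hb0 : b = 0
      · subst hb0
        rw [bGcd]
        simp [Int.gcd, Int.natAbs_of_nonneg ha]
      · have hbpos : 0 < b := by omega
        rw [bGcd]
        simp only [hb0, dite_false]
        have hmod : PySem.Int.mod a b = a % b := PySem.Int.mod_eq_emod_of_pos hbpos
        have hmnn : 0 ≤ a % b := Int.emod_nonneg a hb0
        have hmlt : a % b < b := Int.emod_lt_of_pos a hbpos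
        rw [hmod, ih b (a % b) (by omega) hb hmnn]
        congr 1
        obtain ⟨k, rfl⟩ := Int.eq_ofNat_of_zero_le hb
        obtain ⟨j, rfl⟩ := Int.eq_ofNat_of_zero_le ha
        have hcast : ((j : Int) % (k : Int)) = ((j % k : Nat) : Int) := by push_cast; rfl
        rw [hcast]
        simp only [Int.gcd, Int.natAbs_natCast]
        rw [Nat.gcd_comm k (j % k), ← Nat.gcd_rec, Nat.gcd_comm]

theorem bGcd_eq (a b : Int) (ha : 0 ≤ a) (hb : 0 ≤ b) : bGcd a b = (Int.gcd a b : Int) :=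
  bGcd_eq_aux b.natAbs a b le_rfl ha hb

-- B's fold over the list computes the Nat lcm fold over the sums
theorem bFold_eq (list : List (List Int)) :
    ∀ (n : Nat), 0 < n → (∀ i ∈ list, i.sum ≠ 0) →
      list.foldl
        (fun result seq =>
          let s := |seq.sum|
          PySem.Int.floordiv (result * s) (bGcd result s)) (n : Int) =
      ((list.foldl (fun m i => Nat.lcm m i.sum.natAbs) n : Nat) : Int) := by
  induction list with
  | nil => intro n _ _; simp
  | cons seq rest ih =>
      intro n hn hs
      have hsne : seq.sum ≠ 0 := hs seq (by simp)
      have hk : 0 < seq.sum.natAbs := by omega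
      have habs : |seq.sum| = ((seq.sum.natAbs : Nat) : Int) := by
        rw [Int.abs_eq_natAbs]
      simp only [List.foldl_cons]
      rw [habs, bGcd_eq _ _ (by positivity) (by positivity)]
      have hgcd : Int.gcd (n : Int) ((seq.sum.natAbs : Nat) : Int) = Nat.gcd n seq.sum.natAbs :=
        Int.gcd_natCast_natCast n seq.sum.natAbs
      rw [hgcd]
      have hgpos : 0 < Nat.gcd n seq.sum.natAbs := Nat.gcd_pos_of_pos_left _ hn
      rw [PySem.Int.floordiv_eq_ediv_of_pos (by exact_mod_cast hgpos)]
      have hcast : ((n : Int) * ((seq.sum.natAbs : Nat) : Int)) = ((n * seq.sum.natAbs : Nat) : Int) := by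
        push_cast; ring
      have hdivcast : ((n * seq.sum.natAbs : Nat) : Int) / ((Nat.gcd n seq.sum.natAbs : Nat) : Int) =
          (((n * seq.sum.natAbs) / Nat.gcd n seq.sum.natAbs : Nat) : Int) := by push_cast; rfl
      rw [hcast, hdivcast]
      have hlcm : n * seq.sum.natAbs / Nat.gcd n seq.sum.natAbs = Nat.lcm n seq.sum.natAbs := rfl
      rw [hlcm]
      exact ih (Nat.lcm n seq.sum.natAbs)
        (Nat.pos_of_ne_zero (Nat.lcm_ne_zero (by omega) (by omega)))
        (fun t ht => hs t (by simp [ht]))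

theorem fold_lcm_pos (sums : List Int) :
    ∀ (n : Nat), 0 < n → (∀ s ∈ sums, s ≠ 0) →
      0 < sums.foldl (fun m s => Nat.lcm m s.natAbs) n := by
  induction sums with
  | nil => intro n hn _; simpa
  | cons s rest ih =>
      intro n hn hs
      simp only [List.foldl_cons]
      have hsne : s ≠ 0 := hs s (by simp)
      exact ih _ (Nat.pos_of_ne_zero (Nat.lcm_ne_zero (by omega) (by omega)))
        (fun t ht => hs t (by simp [ht]))

theorem natLcm_pos (sums : List Int) (hs : ∀ s ∈ sums, s ≠ 0) : 0 < natLcm sums :=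
  fold_lcm_pos sums 1 (by omega) hs

theorem fold_lcm_dvd_of_dvd (sums : List Int) :
    ∀ (n d : Nat), d ∣ n → d ∣ sums.foldl (fun m s => Nat.lcm m s.natAbs) n := by
  induction sums with
  | nil => intro n d h; simpa
  | cons s rest ih =>
      intro n d h
      simp only [List.foldl_cons]
      exact ih _ d (h.trans (Nat.dvd_lcm_left _ _))

theorem mem_dvd_fold_lcm (sums : List Int) :
    ∀ (n : Nat) (s : Int), s ∈ sums →
      s.natAbs ∣ sums.foldl (fun m s => Nat.lcm m s.natAbs) n := by
  induction sums with
  | nil => intro n s h; simp at h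
  | cons x rest ih =>
      intro n s h
      simp only [List.foldl_cons]
      rcases List.mem_cons.mp h with h | h
      · subst h
        exact fold_lcm_dvd_of_dvd rest _ _ (Nat.dvd_lcm_right _ _)
      · exact ih _ s h

theorem dvd_natLcm (sums : List Int) (s : Int) (h : s ∈ sums) : s ∣ (natLcm sums : Int) := by
  have := mem_dvd_fold_lcm sums 1 s h
  have h2 : ((s.natAbs : Nat) : Int) ∣ ((natLcm sums : Nat) : Int) := Int.natCast_dvd_natCast.mpr this
  exact (Int.natAbs_dvd).mp h2

-- the Nat lcm fold divides every common multiple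
theorem fold_lcm_dvd (sums : List Int) :
    ∀ (n m : Nat), n ∣ m → (∀ s ∈ sums, s.natAbs ∣ m) →
      sums.foldl (fun k s => Nat.lcm k s.natAbs) n ∣ m := by
  induction sums with
  | nil => intro n m h _; simpa
  | cons s rest ih =>
      intro n m h hs
      simp only [List.foldl_cons]
      exact ih _ _ (Nat.lcm_dvd h (hs s (by simp))) (fun t ht => hs t (by simp [ht]))

theorem natLcm_dvd (sums : List Int) (m : Nat) (h : ∀ s ∈ sums, s.natAbs ∣ m) :
    natLcm sums ∣ m :=
  fold_lcm_dvd sums 1 m (Nat.one_dvd m) h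

theorem fold_lcm_dvd_fold_prod (l : List (List Int)) :
    ∀ (n p : Nat), (∀ i ∈ l, i.sum ≠ 0) → n ∣ p →
      l.foldl (fun m i => Nat.lcm m i.sum.natAbs) n ∣
        l.foldl (fun acc i => acc * max 1 i.sum.natAbs) p := by
  induction l with
  | nil => intro n p _ h; simpa
  | cons x rest ih =>
      intro n p hs h
      simp only [List.foldl_cons]
      have hx : x.sum ≠ 0 := hs x (by simp)
      have hmax : max 1 x.sum.natAbs = x.sum.natAbs := by omega
      rw [hmax]
      apply ih _ _ (fun t ht => hs t (by simp [ht]))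
      exact Nat.lcm_dvd (h.trans (dvd_mul_right _ _)) (dvd_mul_left _ _)

theorem natLcm_dvd_fuel (list : List (List Int)) (hs : ∀ i ∈ list, i.sum ≠ 0) :
    natLcm (list.map (fun i => i.sum)) ∣ aFuel list := by
  unfold natLcm aFuel
  rw [List.foldl_map]
  exact fold_lcm_dvd_fold_prod list 1 1 hs dvd_rfl

theorem aFuel_pos (list : List (List Int)) : 0 < aFuel list := by
  unfold aFuel
  have : ∀ (l : List (List Int)) (n : Nat), 0 < n →
      0 < l.foldl (fun acc i => acc * max 1 i.sum.natAbs) n := by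
    intro l
    induction l with
    | nil => intro n hn; simpa
    | cons x rest ih =>
        intro n hn
        simp only [List.foldl_cons]
        exact ih _ (by positivity)
  exact this list 1 (by omega)

-- ===== VERDICT (by name: the statement is the Claim_ definition above) =====
theorem min_verm_spec : Claim_equal_min_verm := by
  intro list _ hpre
  unfold Spec_min_verm
  set sums := list.map (fun i => i.sum) with hsums
  have hsign : (∀ s ∈ sums, 0 < s) ∨ (∀ s ∈ sums, s < 0) := by
    rcases hpre with hpre | hpre
    · refine Or.inl ?_
      intro s hsm
      rcases List.mem_map.mp hsm with ⟨i, hi, rfl⟩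
      exact hpre i hi
    · refine Or.inr ?_
      intro s hsm
      rcases List.mem_map.mp hsm with ⟨i, hi, rfl⟩
      exact hpre i hi
  have hne : ∀ s ∈ sums, s ≠ 0 := by
    rcases hsign with hsign | hsign <;> exact fun s hs => by have := hsign s hs; omega
  have hnel : ∀ i ∈ list, i.sum ≠ 0 := by
    intro i hi
    have : i.sum ∈ sums := List.mem_map_of_mem hi
    exact hne _ this
  set N := natLcm sums with hN
  have hNpos : 0 < N := natLcm_pos sums hne
  have hokN : ok sums (N : Int) := by
    rw [ok_iff_dvd sums hsign]
    exact fun s hs => dvd_natLcm sums s hs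
  have hleast : ∀ q : Int, 1 ≤ q → q < (N : Int) → ¬ ok sums q := by
    intro q h1 h2 hok
    have hdvd : ∀ s ∈ sums, s ∣ q := (ok_iff_dvd sums hsign q).mp hok
    have hdN : N ∣ q.natAbs := by
      apply natLcm_dvd
      intro s hs
      exact Int.natAbs_dvd_natAbs.mpr (hdvd s hs)
    have hqpos : 0 < q.natAbs := by omega
    have := Nat.le_of_dvd hqpos hdN
    omega
  -- A = N
  have hA : min_verm list = (N : Int) := by
    unfold min_verm
    apply aLoop_finds list (aFuel list) 1 (N : Int) (by exact_mod_cast hNpos) _ hokN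
      (fun q hq1 hq2 => hleast q hq1 hq2)
    have hle : N ≤ aFuel list := Nat.le_of_dvd (aFuel_pos list) (natLcm_dvd_fuel list hnel)
    omega
  -- B = N
  have hB : min_verm_alt list = (N : Int) := by
    unfold min_verm_alt
    have := bFold_eq list 1 (by omega) hnel
    simp only [Nat.cast_one] at this
    rw [this, hN]
    unfold natLcm
    rw [hsums, List.foldl_map]
  rw [hA, hB]
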